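-- pv_equiv track=rewrite | github.com/nirajyt2022-source/edTech | backend/app/api/worksheets.py | _validate_difficulty_engine
-- ===== SOURCE A (Python) =====
-- def _validate_difficulty_engine(
--     data: dict, requested_difficulty: str, is_visual_applicable: bool
-- ) -> list[str]:
--     """For hard worksheets, ensure required question types are present."""
--     if requested_difficulty != "hard":
--         return []
--
--     issues: list[str] = []
--     questions = data.get("questions", [])
--
--     has_thinking = any(q.get("role") == "thinking" for q in questions)
--     has_error_detection = any(q.get("role") == "error_detection" for q in questions)
--     has_application = any(q.get("role") == "application" for q in questions)
--     has_representation = any(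
--         q.get("role") == "representation" and q.get("visual_type")
--         for q in questions
--     )
--
--     if not has_thinking:
--         issues.append("hard difficulty requires at least one thinking (multi-step/reasoning) problem")
--     if not has_error_detection:
--         issues.append("hard difficulty requires at least one error_detection (misconception) problem")
--     if not has_application:
--         issues.append("hard difficulty requires at least one application (word problem) problem")
--     if is_visual_applicable and not has_representation:
--         issues.append("hard difficulty requires at least one representation with visual")
--
--     return issues
-- ===== SOURCE B (Python) =====
-- def _validate_difficulty_engine(
--     data: dict, requested_difficulty: str, is_visual_applicable: bool
-- ) -> list[str]:
--     """For hard worksheets, ensure required question types are present."""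
--     if requested_difficulty != "hard":
--         return []
--
--     present = set()
--     for q in data.get("questions", []):
--         role = q.get("role")
--         if role != "representation" or q.get("visual_type"):
--             present.add(role)
--
--     issues: list[str] = []
--     if "thinking" not in present:
--         issues.append("hard difficulty requires at least one thinking (multi-step/reasoning) problem")
--     if "error_detection" not in present:
--         issues.append("hard difficulty requires at least one error_detection (misconception) problem")
--     if "application" not in present:
--         issues.append("hard difficulty requires at least one application (word problem) problem")
--     if is_visual_applicable and "representation" not in present:
--         issues.append("hard difficulty requires at least one representation with visual")
--     return issues
-- ===== Notes on version B (the rewrite author's own statement) =====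
-- stated objective: alternative
-- what changed: Replaces the four separate any(...) scans over questions with a single pass that builds a set of satisfied roles (gating 'representation' on a truthy visual_type), then derives each issue from a set-membership test.
import Mathlib
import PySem

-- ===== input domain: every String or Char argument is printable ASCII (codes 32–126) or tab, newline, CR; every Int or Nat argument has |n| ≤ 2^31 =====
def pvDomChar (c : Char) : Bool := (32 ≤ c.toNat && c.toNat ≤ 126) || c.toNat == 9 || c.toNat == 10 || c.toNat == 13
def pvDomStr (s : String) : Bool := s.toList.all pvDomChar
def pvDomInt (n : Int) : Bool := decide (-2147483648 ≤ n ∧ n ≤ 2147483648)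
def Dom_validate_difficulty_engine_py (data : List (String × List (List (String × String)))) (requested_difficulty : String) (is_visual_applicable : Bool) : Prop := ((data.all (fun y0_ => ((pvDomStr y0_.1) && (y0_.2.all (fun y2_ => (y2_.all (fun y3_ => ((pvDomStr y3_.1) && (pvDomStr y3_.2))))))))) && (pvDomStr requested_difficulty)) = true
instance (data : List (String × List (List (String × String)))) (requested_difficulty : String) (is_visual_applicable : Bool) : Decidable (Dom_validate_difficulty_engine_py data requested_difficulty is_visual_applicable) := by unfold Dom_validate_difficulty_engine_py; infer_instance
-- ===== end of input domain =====

-- B replaces A's four separate any-scans over the questions with a single pass that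
-- builds a set of satisfied roles, then tests membership (alternative decomposition).


-- shared helpers: q.get(k) on a question dict, and Python truthiness of an optional string
def pvGet (q : List (String × String)) (k : String) : Option String := (PySem.Dict.mk q).get? k
def pvTruthy (o : Option String) : Bool := match o with | some s => s != "" | none => false

-- ===== PORT A =====
def validate_difficulty_engine_py (data : List (String × List (List (String × String)))) (requested_difficulty : String) (is_visual_applicable : Bool) : List String :=
  if requested_difficulty != "hard" then []
  else
    let questions := (PySem.Dict.mk data).getD "questions" []
    let has_thinking := questions.any (fun q => pvGet q "role" == some "thinking")
    let has_error_detection := questions.any (fun q => pvGet q "role" == some "error_detection")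
    let has_application := questions.any (fun q => pvGet q "role" == some "application")
    let has_representation := questions.any (fun q =>
      pvGet q "role" == some "representation" && pvTruthy (pvGet q "visual_type"))
    let issues : List String := []
    let issues := if !has_thinking then issues ++ ["hard difficulty requires at least one thinking (multi-step/reasoning) problem"] else issues
    let issues := if !has_error_detection then issues ++ ["hard difficulty requires at least one error_detection (misconception) problem"] else issues
    let issues := if !has_application then issues ++ ["hard difficulty requires at least one application (word problem) problem"] else issues
    let issues := if is_visual_applicable && !has_representation then issues ++ ["hard difficulty requires at least one representation with visual"] else issues
    issues

-- ===== PORT B =====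
-- the single pass of Source B: the set of roles satisfied ('representation' gated on visual_type)
def pvPresent (questions : List (List (String × String))) : PySem.Set (Option String) :=
  questions.foldl (fun s q =>
    let role := pvGet q "role"
    if role != some "representation" || pvTruthy (pvGet q "visual_type")
    then PySem.Set.add s role else s) PySem.Set.empty

def validate_difficulty_engine_py_alt (data : List (String × List (List (String × String)))) (requested_difficulty : String) (is_visual_applicable : Bool) : List String :=
  if requested_difficulty != "hard" then []
  else
    let present := pvPresent ((PySem.Dict.mk data).getD "questions" [])
    (if !(PySem.Set.contains present (some "thinking")) then ["hard difficulty requires at least one thinking (multi-step/reasoning) problem"] else []) ++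
    (if !(PySem.Set.contains present (some "error_detection")) then ["hard difficulty requires at least one error_detection (misconception) problem"] else []) ++
    (if !(PySem.Set.contains present (some "application")) then ["hard difficulty requires at least one application (word problem) problem"] else []) ++
    (if is_visual_applicable && !(PySem.Set.contains present (some "representation")) then ["hard difficulty requires at least one representation with visual"] else [])

-- ===== PRECONDITION & SPEC =====
def Spec_validate_difficulty_engine_py (data : List (String × List (List (String × String)))) (requested_difficulty : String) (is_visual_applicable : Bool) (out : List String) : Prop := out = validate_difficulty_engine_py_alt data requested_difficulty is_visual_applicable
instance (data : List (String × List (List (String × String)))) (requested_difficulty : String) (is_visual_applicable : Bool) (out : List String) : Decidable (Spec_validate_difficulty_engine_py data requested_difficulty is_visual_applicable out) := by unfold Spec_validate_difficulty_engine_py; infer_instance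

-- ===== CLAIM (what is proved, stated in full; the proofs are below) =====
def Claim_equal_validate_difficulty_engine_py : Prop := ∀ (data : List (String × List (List (String × String)))) (requested_difficulty : String) (is_visual_applicable : Bool), Dom_validate_difficulty_engine_py data requested_difficulty is_visual_applicable → Spec_validate_difficulty_engine_py data requested_difficulty is_visual_applicable (validate_difficulty_engine_py data requested_difficulty is_visual_applicable)

-- ===== LEMMAS AND PROOFS =====

-- membership in the set built by B's single pass
theorem mem_pvPresent_foldl (qs : List (List (String × String))) (s : PySem.Set (Option String)) (x : Option String) :
    x ∈ qs.foldl (fun s q =>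
      if pvGet q "role" != some "representation" || pvTruthy (pvGet q "visual_type")
      then PySem.Set.add s (pvGet q "role") else s) s ↔
    x ∈ s ∨ ∃ q ∈ qs, (pvGet q "role" != some "representation" || pvTruthy (pvGet q "visual_type")) = true ∧ pvGet q "role" = x := by
  induction qs generalizing s with
  | nil => simp
  | cons q qs ih =>
    simp only [List.foldl_cons]
    by_cases h : (pvGet q "role" != some "representation" || pvTruthy (pvGet q "visual_type")) = true
    · rw [if_pos h, ih]
      simp only [PySem.Set.mem_add, List.mem_cons]
      constructor
      · rintro ((hs | rfl) | ⟨q', hq', hg, hr⟩)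
        · exact Or.inl hs
        · exact Or.inr ⟨q, Or.inl rfl, h, rfl⟩
        · exact Or.inr ⟨q', Or.inr hq', hg, hr⟩
      · rintro (hs | ⟨q', (rfl | hq'), hg, hr⟩)
        · exact Or.inl (Or.inl hs)
        · exact Or.inl (Or.inr hr.symm)
        · exact Or.inr ⟨q', hq', hg, hr⟩
    · rw [if_neg h, ih]
      constructor
      · rintro (hs | ⟨q', hq', hg, hr⟩)
        · exact Or.inl hs
        · exact Or.inr ⟨q', List.mem_cons_of_mem _ hq', hg, hr⟩
      · rintro (hs | ⟨q', hq', hg, hr⟩)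
        · exact Or.inl hs
        · rcases List.mem_cons.mp hq' with rfl | hq'
          · exact absurd hg h
          · exact Or.inr ⟨q', hq', hg, hr⟩

-- a non-'representation' role is in the set iff some question has that role
theorem contains_pvPresent_role (qs : List (List (String × String))) (x : Option String)
    (hx : x ≠ some "representation") :
    PySem.Set.contains (pvPresent qs) x = qs.any (fun q => pvGet q "role" == x) := by
  rw [Bool.eq_iff_iff, PySem.Set.contains_iff, pvPresent, mem_pvPresent_foldl, List.any_eq_true]
  simp only [PySem.Set.empty, List.not_mem_nil, false_or, beq_iff_eq]
  constructor
  · rintro ⟨q, hq, _, hr⟩; exact ⟨q, hq, hr⟩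
  · rintro ⟨q, hq, hr⟩
    refine ⟨q, hq, ?_, hr⟩
    rw [hr]
    simp [bne_iff_ne, hx]

-- 'representation' is in the set iff some question has it together with a truthy visual_type
theorem contains_pvPresent_repr (qs : List (List (String × String))) :
    PySem.Set.contains (pvPresent qs) (some "representation") =
      qs.any (fun q => pvGet q "role" == some "representation" && pvTruthy (pvGet q "visual_type")) := by
  rw [Bool.eq_iff_iff, PySem.Set.contains_iff, pvPresent, mem_pvPresent_foldl, List.any_eq_true]
  simp only [PySem.Set.empty, List.not_mem_nil, false_or, Bool.and_eq_true, beq_iff_eq]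
  constructor
  · rintro ⟨q, hq, hg, hr⟩
    refine ⟨q, hq, hr, ?_⟩
    rw [hr] at hg
    simpa using hg
  · rintro ⟨q, hq, hr, hv⟩
    exact ⟨q, hq, by simp [hr, hv], hr⟩

-- ===== VERDICT (by name: the statement is the Claim_ definition above) =====
theorem validate_difficulty_engine_py_spec : Claim_equal_validate_difficulty_engine_py := by
  intro data requested_difficulty is_visual_applicable _
  unfold Spec_validate_difficulty_engine_py validate_difficulty_engine_py validate_difficulty_engine_py_alt
  by_cases h : (requested_difficulty != "hard") = true
  · rw [if_pos h, if_pos h]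
  · rw [if_neg h, if_neg h]
    dsimp only
    rw [contains_pvPresent_role _ _ (by simp), contains_pvPresent_role _ _ (by simp),
        contains_pvPresent_role _ _ (by simp), contains_pvPresent_repr]
    cases ((PySem.Dict.mk data).getD "questions" []).any (fun q => pvGet q "role" == some "thinking") <;>
    cases ((PySem.Dict.mk data).getD "questions" []).any (fun q => pvGet q "role" == some "error_detection") <;>
    cases ((PySem.Dict.mk data).getD "questions" []).any (fun q => pvGet q "role" == some "application") <;>
    cases ((PySem.Dict.mk data).getD "questions" []).any (fun q => pvGet q "role" == some "representation" && pvTruthy (pvGet q "visual_type")) <;>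
    cases is_visual_applicable <;> rfl
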